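-- pv_equiv track=rewrite | github.com/sieukim/algorithm-programmers | level2/ex66.py | solution
-- ===== SOURCE A (Python) =====
-- def solution(n, apeach, k=11):
--     def dfs(n, i=0, lion=[0 for _ in range(k)]):
--         # 모든 화살을 사용한 경우
--         if n == 0:
--             answer.append(lion)
--             return
--         # 탐색 종료
--         if i == k+1 or n < 0:
--             return
--         if i < k:
--             # 라이언이 점수를 획득하는 경우
--             dfs(n-(apeach[i]+1), i+1, [value if j != i else apeach[i]+1 for j, value in enumerate(lion)])
--             # 라이언이 점수를 포기하는 경우
--             dfs(n, i+1, [value for value in lion])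
--         else:
--             dfs(0, i+1, [value for value in lion[:-1]+[n]])
--
--     # 라이언과 어피치의 점수 차이를 반환하는 함수
--     def result(lion, apeach):
--         diff = 0
--
--         for i in range(k):
--             # 라이언 득점
--             if lion[i] > 0:
--                 diff += k-i-1
--             # 어피치 득점
--             elif apeach[i] > 0:
--                 diff -= k-i-1
--
--         return diff
--
--     answer = []
--     dfs(n)
--
--     # 라이언 기록 => (라이언 기록, 어피치와의 점수 차이)
--     answer = list(map(lambda lion: (lion, result(lion, apeach)), answer))
--     # 최대 점수 차이
--     max_diff = max(answer, key=lambda x: x[1])[1]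
--     # 라이언이 이길 수 없는 경우
--     if max_diff <= 0:
--         return [-1]
--     # 최대 점수 차이를 갖는 기록만 필터링
--     answer = [info[0] for info in filter(lambda x: x[1] == max_diff, answer)]
--     # 가장 낮은 점수를 더 맞힌 경우
--     answer = sorted(answer, key=lambda x: str(x[::-1]))[-1]
--     return answer
-- ===== SOURCE B (Python) =====
-- def solution(n, apeach, k=11):
--     # Breadth-wise enumeration: grow every take/pass assignment zone by zone
--     # (take listed before pass), dropping any partial assignment that has
--     # already spent more than n arrows; then turn each surviving assignment
--     # into Lion's record, dumping every leftover arrow into the last zone.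
--     states = [([], 0)]                      # (record prefix, arrows used)
--     for i in range(k):
--         nxt = []
--         for lion, used in states:
--             u2 = used + apeach[i] + 1
--             if used < n and u2 <= n:
--                 nxt.append((lion + [apeach[i] + 1], u2))
--             nxt.append((lion + [0], used))
--         states = nxt
--     answer = []
--     for lion, used in states:
--         if used < n:
--             lion = lion[:k-1] + [n - used]
--         answer.append(lion)
--
--     # judging phase: identical scoring and tie-break rules
--     def result(lion, apeach):
--         diff = 0
--         for i in range(k):
--             if lion[i] > 0:
--                 diff += k-i-1
--             elif apeach[i] > 0:
--                 diff -= k-i-1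
--         return diff
--
--     answer = list(map(lambda lion: (lion, result(lion, apeach)), answer))
--     max_diff = max(answer, key=lambda x: x[1])[1]
--     if max_diff <= 0:
--         return [-1]
--     answer = [info[0] for info in filter(lambda x: x[1] == max_diff, answer)]
--     answer = sorted(answer, key=lambda x: str(x[::-1]))[-1]
--     return answer
-- ===== Notes on version B (the rewrite author's own statement) =====
-- stated objective: alternative
-- what changed: A's recursive depth-first search with early returns and in-place zone overwrites is replaced by an iterative breadth-wise enumeration of take/pass assignments, growing all candidate records level by level under the same cannot-overspend/already-exhausted pruning, followed by a uniform leftover-dump candidate build; the scoring and tie-break phase is kept verbatim. Pre_ excludes exactly the inputs where A raises: n < 0 and k = -1 with n != 0 (ValueError on an empty candidate list) and k > len(apeach) (IndexError).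
import Mathlib
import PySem

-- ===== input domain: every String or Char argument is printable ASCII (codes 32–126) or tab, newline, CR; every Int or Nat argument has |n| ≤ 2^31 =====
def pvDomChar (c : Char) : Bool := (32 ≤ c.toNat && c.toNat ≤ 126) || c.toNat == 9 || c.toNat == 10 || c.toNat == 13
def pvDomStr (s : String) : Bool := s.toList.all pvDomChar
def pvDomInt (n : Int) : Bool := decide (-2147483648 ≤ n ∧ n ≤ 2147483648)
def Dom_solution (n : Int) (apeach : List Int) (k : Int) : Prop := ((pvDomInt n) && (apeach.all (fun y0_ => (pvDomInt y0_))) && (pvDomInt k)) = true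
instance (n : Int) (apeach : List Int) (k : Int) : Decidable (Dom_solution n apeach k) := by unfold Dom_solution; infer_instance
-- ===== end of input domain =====

-- B replaces A's recursive pruned DFS by an iterative breadth-wise enumeration of take/pass
-- assignments with the same cost bound (objective: alternative); the judging phase is kept verbatim.


-- ===== PORT A =====

-- str(xs) for a Python list of ints, as a List Char: "[", ", "-separated str(int), "]" (exact for int lists)
def pyReprList (xs : List Int) : List Char :=
  '[' :: (List.intercalate [',', ' '] (xs.map PySem.Int.toChars) ++ [']'])

-- A's inner 'result' helper (apeach[i]/lion[i] in range under Pre_solution)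
def resultA (apeach : List Int) (k : Int) (lion : List Int) : Int :=
  (PySem.List.pyRange 0 k 1).foldl (fun diff i =>
    if PySem.List.pyGetD lion i 0 > 0 then diff + (k - i - 1)
    else if PySem.List.pyGetD apeach i 0 > 0 then diff - (k - i - 1)
    else diff) 0

-- the judging phase after the candidate lists are built; this text is VERBATIM IDENTICAL in Source A
-- and Source B, so both ports share this transliteration
def judge (apeach : List Int) (k : Int) (answer0 : List (List Int)) : List Int :=
  let answer := answer0.map (fun lion => (lion, resultA apeach k lion))
  -- max(answer, key=...)[1]; Python raises on an empty list — Pre_solution keeps answer0 nonempty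
  let maxDiff := ((PySem.List.max? answer (fun x => x.2)).getD ([], 0)).2
  if maxDiff ≤ 0 then [-1]
  else
    let answer2 := (answer.filter (fun x => x.2 == maxDiff)).map (fun x => x.1)
    -- x[::-1] is x.reverse (PySem.List.slice?_none_none_neg_one); str(…) is pyReprList
    let answer3 := PySem.List.sorted answer2 (fun x => pyReprList x.reverse) false
    PySem.List.pyGetD answer3 (-1) []   -- …[-1]; nonempty here under Pre_solution

-- A's dfs; recursion is structural on i (depth ≤ k+2), given here as fuel k.toNat+2
def dfsA (apeach : List Int) (k : Int) : Nat → Int → Int → List Int → List (List Int) → List (List Int)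
  | 0, _, _, _, acc => acc
  | fuel+1, n, i, lion, acc =>
    if n = 0 then acc ++ [lion]
    else if i = k + 1 ∨ n < 0 then acc
    else if i < k then
      let p := PySem.List.pyGetD apeach i 0 + 1
      -- take: lion with lion[i] = apeach[i]+1 via the enumerate comprehension
      let acc' := dfsA apeach k fuel (n - p) (i + 1)
        ((PySem.List.enumerate lion).map (fun jv => if jv.1 ≠ i then jv.2 else p)) acc
      -- pass: [value for value in lion]
      dfsA apeach k fuel n (i + 1) (lion.map (fun v => v)) acc'
    else
      -- lion[:-1] + [n]  (PySem.List.slice_to_neg_one: xs[:-1] = dropLast)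
      dfsA apeach k fuel 0 (i + 1) (lion.dropLast ++ [n]) acc

def solution (n : Int) (apeach : List Int) (k : Int) : List Int :=
  -- initial lion = [0 for _ in range(k)]
  judge apeach k (dfsA apeach k (k.toNat + 2) n 0 (List.replicate k.toNat 0) [])

-- ===== PORT B =====

def solution_alt (n : Int) (apeach : List Int) (k : Int) : List Int :=
  -- breadth-wise growth of (record prefix, arrows used) states, pruning overspent states
  let states := (PySem.List.pyRange 0 k 1).foldl
    (fun states i =>
      states.foldl (fun nxt lu =>
        let u2 := lu.2 + (PySem.List.pyGetD apeach i 0 + 1)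
        (if lu.2 < n ∧ u2 ≤ n then nxt ++ [(lu.1 ++ [PySem.List.pyGetD apeach i 0 + 1], u2)] else nxt)
          ++ [(lu.1 ++ [0], lu.2)]) [])
    [([], 0)]
  -- each surviving state becomes a record; leftover arrows go to the last zone (lion[:k-1]+[n-used])
  let answer := states.foldl (fun acc lu =>
      acc ++ [if lu.2 < n then PySem.List.slice lu.1 none (some (k - 1)) ++ [n - lu.2] else lu.1]) []
  judge apeach k answer

-- ===== PRECONDITION & SPEC =====
-- Pre_solution is exactly where A returns normally: a nonnegative arrow count with a score entry
-- for every one of the k zones, or the degenerate zoneless inputs k ≤ 0 (where A returns [-1]).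
-- Outside it A raises: ValueError on n < 0 and on k = -1 with n ≠ 0 (empty candidate list),
-- IndexError on k > len(apeach).
def Pre_solution (n : Int) (apeach : List Int) (k : Int) : Prop :=
  (0 ≤ n ∧ 1 ≤ k ∧ k ≤ (apeach.length : Int)) ∨ (0 ≤ n ∧ k ≤ 0 ∧ (k = -1 → n = 0))
instance (n : Int) (apeach : List Int) (k : Int) : Decidable (Pre_solution n apeach k) := by
  unfold Pre_solution; infer_instance

def pvWitness_solution : Int × List Int × Int := (5, [2, 1, 0], 3)

def Spec_solution (n : Int) (apeach : List Int) (k : Int) (out : List Int) : Prop := out = solution_alt n apeach k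
instance (n : Int) (apeach : List Int) (k : Int) (out : List Int) : Decidable (Spec_solution n apeach k out) := by unfold Spec_solution; infer_instance

-- ===== CLAIM (what is proved, stated in full; the proofs are below) =====
def Claim_equal_solution : Prop := ∀ (n : Int) (apeach : List Int) (k : Int), Dom_solution n apeach k → Pre_solution n apeach k → Spec_solution n apeach k (solution n apeach k)

-- ===== LEMMAS AND PROOFS =====

-- price of zone i
def price (apeach : List Int) (i : Int) : Int := PySem.List.pyGetD apeach i 0 + 1

-- all take/pass sequences of length m, lexicographic with take (true) first
def seqsC : Nat → List (List Bool)
  | 0 => [[]]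
  | m+1 => (seqsC m).map (true :: ·) ++ (seqsC m).map (false :: ·)

-- the candidate a take/pass suffix t contributes in A's search, given remaining arrows r,
-- position i and current record lion (mirrors dfs's entry checks)
def candS (apeach : List Int) : Int → Int → List Int → List Bool → Option (List Int)
  | r, _, lion, [] => if r = 0 then some lion else if r < 0 then none else some (lion.dropLast ++ [r])
  | r, i, lion, b :: t =>
    if r = 0 then (if b then none else candS apeach r (i+1) lion t)
    else if r < 0 then none
    else if b then candS apeach (r - price apeach i) (i+1) (lion.set i.toNat (price apeach i)) t
    else candS apeach r (i+1) lion t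

-- the state B's level loop keeps for a take/pass prefix t, given arrows used so far
def stS (apeach : List Int) (n : Int) : Int → Int → List Bool → Option (List Int × Int)
  | _, used, [] => some ([], used)
  | i, used, b :: t =>
    if b then
      (if used < n ∧ used + price apeach i ≤ n then
        (stS apeach n (i+1) (used + price apeach i) t).map (fun r => (price apeach i :: r.1, r.2))
      else none)
    else (stS apeach n (i+1) used t).map (fun r => (0 :: r.1, r.2))

lemma length_of_mem_seqsC {m : Nat} {t : List Bool} (h : t ∈ seqsC m) : t.length = m := by
  induction m generalizing t with
  | zero => simp [seqsC] at h; simp [h]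
  | succ m ih =>
    simp only [seqsC, List.mem_append, List.mem_map] at h
    rcases h with ⟨s, hs, rfl⟩ | ⟨s, hs, rfl⟩ <;> simp [ih hs]

lemma seqsC_succ_right (m : Nat) :
    seqsC (m+1) = (seqsC m).flatMap (fun s => [s ++ [true], s ++ [false]]) := by
  induction m with
  | zero => simp [seqsC]
  | succ m ih =>
    show (seqsC (m+1)).map (true :: ·) ++ (seqsC (m+1)).map (false :: ·)
        = ((seqsC m).map (true :: ·) ++ (seqsC m).map (false :: ·)).flatMap
            (fun s => [s ++ [true], s ++ [false]])
    rw [ih]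
    simp [List.flatMap_append, List.flatMap_map, List.map_flatMap]

lemma flatMap_filterMap' {α β γ : Type} (l : List α) (f : α → Option β) (g : β → List γ) :
    (l.filterMap f).flatMap g = l.flatMap (fun a => ((f a).map g).getD []) := by
  induction l with
  | nil => rfl
  | cons a l ih =>
    cases h : f a <;> simp [h, ih]

lemma candS_neg (apeach : List Int) (r i : Int) (lion : List Int) (t : List Bool) (hr : r < 0) :
    candS apeach r i lion t = none := by
  cases t <;> simp [candS, hr, show r ≠ 0 from by omega]

lemma filterMap_candS_zero (apeach : List Int) (m : Nat) :
    ∀ (i : Int) (lion : List Int),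
    (seqsC m).filterMap (candS apeach 0 i lion) = [lion] := by
  induction m with
  | zero => intro i lion; simp [seqsC, candS]
  | succ m ih =>
    intro i lion
    simp only [seqsC, List.filterMap_append, List.filterMap_map, Function.comp_def]
    rw [show (fun t => candS apeach 0 i lion (true :: t)) = (fun _ => (none : Option (List Int)))
        from by funext t; simp [candS]]
    rw [show (fun t => candS apeach 0 i lion (false :: t))
          = (fun t => candS apeach 0 (i+1) lion t) from by funext t; simp [candS]]
    simp [ih (i+1) lion]

lemma filterMap_candS_neg (apeach : List Int) (m : Nat) (r i : Int) (lion : List Int)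
    (hr : r < 0) : (seqsC m).filterMap (candS apeach r i lion) = [] := by
  rw [show candS apeach r i lion = (fun _ => none) from by funext t; exact candS_neg _ _ _ _ _ hr]
  simp

lemma enumMap_id (lion : List Int) : ∀ (s i p : Int), i < s →
    (PySem.List.enumerate lion s).map (fun jv => if jv.1 ≠ i then jv.2 else p) = lion := by
  induction lion with
  | nil => intro s i p h; simp [PySem.List.enumerate_nil]
  | cons x l ih =>
    intro s i p h
    rw [PySem.List.enumerate_cons]
    simp only [List.map_cons]
    rw [if_pos (by omega : (s:Int) ≠ i), ih (s+1) i p (by omega)]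

lemma enumMap_set (lion : List Int) : ∀ (s i p : Int), s ≤ i →
    (PySem.List.enumerate lion s).map (fun jv => if jv.1 ≠ i then jv.2 else p)
      = lion.set (i - s).toNat p := by
  induction lion with
  | nil => intro s i p h; simp [PySem.List.enumerate_nil]
  | cons x l ih =>
    intro s i p h
    rw [PySem.List.enumerate_cons]
    simp only [List.map_cons]
    rcases eq_or_lt_of_le h with rfl | hlt
    · rw [if_neg (by omega : ¬ (s:Int) ≠ s), enumMap_id l (s+1) s p (by omega)]
      have h0 : (s - s).toNat = 0 := by omega
      rw [h0]; rfl
    · rw [if_pos (by omega : (s:Int) ≠ i), ih (s+1) i p (by omega)]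
      have h1 : (i - s).toNat = (i - (s+1)).toNat + 1 := by omega
      rw [h1]; rfl

-- A's dfs computes exactly the candS-filterMap over all take/pass sequences
lemma dfsA_eq (apeach : List Int) (k : Int) (m : Nat) :
    ∀ (fuel : Nat) (i n : Int) (lion : List Int) (acc : List (List Int)),
    0 ≤ i → i + m = k → m + 2 ≤ fuel →
    dfsA apeach k fuel n i lion acc = acc ++ (seqsC m).filterMap (candS apeach n i lion) := by
  induction m with
  | zero =>
    intro fuel i n lion acc hi hik hfuel
    match fuel, hfuel with
    | f + 2, _ =>
    by_cases hn0 : n = 0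
    · subst hn0
      simp [dfsA, seqsC, candS]
    · by_cases hnneg : n < 0
      · rw [show dfsA apeach k (f+2) n i lion acc = acc from by
          simp [dfsA, hn0, if_pos (Or.inr hnneg)]]
        simp [seqsC, candS, hn0, hnneg]
      · have hguard : ¬ (i = k + 1 ∨ n < 0) := by omega
        have hlt : ¬ i < k := by omega
        simp only [dfsA, if_neg hn0, if_neg hguard, if_neg hlt]
        simp [seqsC, candS, hn0, hnneg]
  | succ m ih =>
    intro fuel i n lion acc hi hik hfuel
    match fuel, hfuel with
    | f + 1, _ =>
    have hlt : i < k := by push_cast at hik; omega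
    by_cases hn0 : n = 0
    · subst hn0
      rw [show dfsA apeach k (f+1) 0 i lion acc = acc ++ [lion] from by simp [dfsA],
          filterMap_candS_zero apeach (m+1) i lion]
    · by_cases hnneg : n < 0
      · simp only [dfsA, if_neg hn0, if_pos (Or.inr hnneg)]
        rw [filterMap_candS_neg apeach (m+1) n i lion hnneg]
        simp
      · have hguard : ¬ (i = k + 1 ∨ n < 0) := by omega
        simp only [dfsA, if_neg hn0, if_neg hguard, if_pos hlt]
        rw [enumMap_set lion 0 i (PySem.List.pyGetD apeach i 0 + 1) hi]
        have hset : (i - 0).toNat = i.toNat := by omega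
        rw [hset]
        rw [ih f (i+1) (n - (PySem.List.pyGetD apeach i 0 + 1)) _ acc (by omega)
          (by push_cast at hik ⊢; omega) (by omega)]
        rw [List.map_id']
        rw [ih f (i+1) n lion _ (by omega) (by push_cast at hik ⊢; omega) (by omega)]
        simp only [seqsC, List.filterMap_append, List.filterMap_map, Function.comp_def]
        rw [show (fun t => candS apeach n i lion (true :: t))
              = (fun t => candS apeach (n - price apeach i) (i+1)
                    (lion.set i.toNat (price apeach i)) t) from by
            funext t; simp [candS, hn0, hnneg]]
        rw [show (fun t => candS apeach n i lion (false :: t))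
              = (fun t => candS apeach n (i+1) lion t) from by
            funext t; simp [candS, hn0, hnneg]]
        simp only [price]
        rw [List.append_assoc]

lemma length_stS (apeach : List Int) (n : Int) :
    ∀ (t : List Bool) (i used : Int) (r : List Int × Int),
    stS apeach n i used t = some r → r.1.length = t.length := by
  intro t
  induction t with
  | nil => intro i used r h; simp [stS] at h; simp [← h]
  | cons b t ih =>
    intro i used r h
    cases b
    · simp only [stS, Bool.false_eq_true, if_false] at h
      rcases Option.map_eq_some_iff.mp h with ⟨r', hr', rfl⟩
      simp [ih (i+1) used r' hr']
    · simp only [stS, if_true] at h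
      split at h
      · rcases Option.map_eq_some_iff.mp h with ⟨r', hr', rfl⟩
        simp [ih _ _ r' hr']
      · simp at h

lemma stS_append (apeach : List Int) (n : Int) :
    ∀ (t : List Bool) (i used : Int) (b : Bool),
    stS apeach n i used (t ++ [b]) = (stS apeach n i used t).bind (fun r =>
      if b then
        (if r.2 < n ∧ r.2 + price apeach (i + t.length) ≤ n
         then some (r.1 ++ [price apeach (i + t.length)], r.2 + price apeach (i + t.length))
         else none)
      else some (r.1 ++ [0], r.2)) := by
  intro t
  induction t with
  | nil =>
    intro i used b
    cases b <;> simp [stS] <;> split <;> simp [stS]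
  | cons c t ih =>
    intro i used b
    have hc : i + (((c :: t).length : Nat) : Int) = i + 1 + (t.length : Int) := by push_cast [List.length_cons]; omega
    rw [List.cons_append]
    cases c
    · simp only [stS, Bool.false_eq_true, if_false, ih (i+1) used b, hc]
      cases h : stS apeach n (i+1) used t
      · simp
      · cases b <;> simp [h] <;> split <;> simp
    · simp only [stS, if_true, hc]
      by_cases hg : used < n ∧ used + price apeach i ≤ n
      · simp only [if_pos hg, ih (i+1) (used + price apeach i) b]
        cases h : stS apeach n (i+1) (used + price apeach i) t
        · simp
        · cases b <;> simp [h] <;> split <;> simp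
      · simp [hg]

-- B's states after the first j levels
lemma statesB (apeach : List Int) (n k : Int) :
    ∀ (j : Nat), (j : Int) ≤ k →
    (PySem.List.pyRange 0 j 1).foldl
      (fun states i =>
        states.foldl (fun nxt lu =>
          let u2 := lu.2 + (PySem.List.pyGetD apeach i 0 + 1)
          (if lu.2 < n ∧ u2 ≤ n then nxt ++ [(lu.1 ++ [PySem.List.pyGetD apeach i 0 + 1], u2)] else nxt)
            ++ [(lu.1 ++ [0], lu.2)]) [])
      [(([] : List Int), (0 : Int))]
    = (seqsC j).filterMap (stS apeach n 0 0) := by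
  intro j
  induction j with
  | zero =>
    intro _
    simp only [Nat.cast_zero]
    rw [PySem.List.pyRange_one_eq_nil le_rfl]
    simp [seqsC, stS]
  | succ j ih =>
    intro hj
    have hj' : (j : Int) ≤ k := by push_cast at hj ⊢; omega
    have hcast : ((j+1 : Nat) : Int) = (j : Int) + 1 := by push_cast; ring
    rw [hcast, PySem.List.pyRange_one_succ_right (by positivity), List.foldl_append, ih hj']
    simp only [List.foldl_cons, List.foldl_nil]
    have hfun : (fun (nxt : List (List Int × Int)) (lu : List Int × Int) =>
        let u2 := lu.2 + (PySem.List.pyGetD apeach (j:Int) 0 + 1)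
        (if lu.2 < n ∧ u2 ≤ n then nxt ++ [(lu.1 ++ [PySem.List.pyGetD apeach (j:Int) 0 + 1], u2)] else nxt)
          ++ [(lu.1 ++ [0], lu.2)])
        = fun nxt lu => nxt ++
            ((if lu.2 < n ∧ lu.2 + (PySem.List.pyGetD apeach (j:Int) 0 + 1) ≤ n
              then [(lu.1 ++ [PySem.List.pyGetD apeach (j:Int) 0 + 1],
                     lu.2 + (PySem.List.pyGetD apeach (j:Int) 0 + 1))] else [])
              ++ [(lu.1 ++ [0], lu.2)]) := by
      funext nxt lu; dsimp only; split <;> simp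
    rw [hfun, PySem.List.foldl_append_eq_flatMap, List.nil_append, flatMap_filterMap',
      seqsC_succ_right, List.filterMap_flatMap]
    apply List.flatMap_congr
    intro t ht
    have hlen := length_of_mem_seqsC ht
    rw [List.filterMap_cons, List.filterMap_cons, List.filterMap_nil,
      stS_append, stS_append]
    cases hst : stS apeach n 0 0 t
    · simp
    · simp only [Option.bind_some, Option.map_some, Option.getD_some, zero_add, hlen, price]
      split <;> simp

-- A's per-sequence candidate is B's surviving state finished with the leftover dump
lemma append_cons_eq {α : Type} (pre : List α) (x : α) (l : List α) :
    (pre ++ [x]) ++ l = pre ++ x :: l := by simp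

lemma bridge (apeach : List Int) (n : Int) :
    ∀ (t : List Bool) (pre : List Int) (used : Int), used ≤ n →
    candS apeach (n - used) (pre.length : Int) (pre ++ List.replicate t.length 0) t
      = (stS apeach n (pre.length : Int) used t).map
          (fun r => if r.2 < n then (pre ++ r.1).dropLast ++ [n - r.2] else pre ++ r.1) := by
  intro t
  induction t with
  | nil =>
    intro pre used hu
    rcases eq_or_lt_of_le hu with heq | hlt
    · simp [candS, stS, show n - used = 0 from by omega, show ¬ used < n from by omega]
    · simp [candS, stS, show ¬ (n - used) = 0 from by omega,
        show ¬ (n - used) < 0 from by omega, hlt]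
  | cons b t ih =>
    intro pre used hu
    by_cases hueq : used = n
    · -- no arrows left: only the pass chain survives
      cases b
      · have harg : pre ++ List.replicate (false :: t).length 0
            = (pre ++ [0]) ++ List.replicate t.length 0 := by simp [List.replicate_succ]
        have hlen1 : (((pre ++ [(0:Int)]).length : Nat) : Int) = (pre.length : Int) + 1 := by simp
        have ih' := ih (pre ++ [(0:Int)]) used hu
        rw [hlen1] at ih'
        simp only [candS, if_pos (show n - used = 0 from by omega), Bool.false_eq_true,
          if_false, harg, ih']
        simp only [stS, Bool.false_eq_true, if_false]
        cases h : stS apeach n ((pre.length : Int) + 1) used t <;> simp [h, append_cons_eq]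
      · simp [candS, stS, show n - used = 0 from by omega, show ¬ used < n from by omega]
    · have hlt : used < n := by omega
      have hne : ¬ (n - used = 0) := by omega
      have hneg : ¬ (n - used < 0) := by omega
      cases b
      · have harg : pre ++ List.replicate (false :: t).length 0
            = (pre ++ [0]) ++ List.replicate t.length 0 := by simp [List.replicate_succ]
        have hlen1 : (((pre ++ [(0:Int)]).length : Nat) : Int) = (pre.length : Int) + 1 := by simp
        have ih' := ih (pre ++ [(0:Int)]) used hu
        rw [hlen1] at ih'
        simp only [candS, if_neg hne, if_neg hneg, Bool.false_eq_true, if_false, harg, ih']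
        simp only [stS, Bool.false_eq_true, if_false]
        cases h : stS apeach n ((pre.length : Int) + 1) used t <;> simp [h, append_cons_eq]
      · -- take zone pre.length
        simp only [candS, if_neg hne, if_neg hneg, if_true]
        by_cases hp : used + price apeach (pre.length : Int) ≤ n
        · have harg : (pre ++ List.replicate (true :: t).length 0).set
                ((pre.length : Int)).toNat (price apeach (pre.length : Int))
              = (pre ++ [price apeach (pre.length : Int)]) ++ List.replicate t.length 0 := by
            simp [List.replicate_succ]
          have hlen1 : (((pre ++ [price apeach (pre.length : Int)]).length : Nat) : Int)
              = (pre.length : Int) + 1 := by simp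
          have hrw : n - used - price apeach (pre.length : Int)
              = n - (used + price apeach (pre.length : Int)) := by ring
          have ih' := ih (pre ++ [price apeach (pre.length : Int)])
            (used + price apeach (pre.length : Int)) (by omega)
          rw [hlen1] at ih'
          rw [harg, hrw, ih']
          simp only [stS, if_true, if_pos (And.intro hlt hp)]
          cases h : stS apeach n ((pre.length : Int) + 1)
              (used + price apeach (pre.length : Int)) t <;> simp [h, append_cons_eq]
        · rw [candS_neg apeach _ _ _ t (by omega)]
          simp [stS, hlt, hp]

theorem solution_spec : Claim_equal_solution := by
  intro n apeach k _ hpre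
  rcases hpre with ⟨hn, hk, hkl⟩ | ⟨hn, hk, hkm1⟩
  case inr =>
    show solution n apeach k = solution_alt n apeach k
    have hkt : k.toNat = 0 := by omega
    simp only [solution, solution_alt, hkt]
    rw [PySem.List.pyRange_one_eq_nil (by omega : k ≤ 0)]
    by_cases hn0 : n = 0
    · subst hn0
      simp [dfsA]
    · have hg : ¬ ((0:Int) = k + 1 ∨ n < 0) := by omega
      simp [dfsA, hn0, hg, show ¬ (0:Int) < k from by omega, PySem.List.slice,
        show (0:Int) < n from by omega]
  show solution n apeach k = solution_alt n apeach k
  have h0k : (0:Int) + (k.toNat : Int) = k := by omega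
  have hA := dfsA_eq apeach k k.toNat (k.toNat + 2) 0 n (List.replicate k.toNat 0) []
    le_rfl h0k (by omega)
  have hB := statesB apeach n k k.toNat (by omega)
  have hkk : ((k.toNat : Nat) : Int) = k := by omega
  rw [hkk] at hB
  simp only [solution, solution_alt]
  rw [hA, hB, List.nil_append, PySem.List.foldl_append_singleton_eq_map, List.nil_append,
    List.map_filterMap]
  congr 1
  apply List.filterMap_congr
  intro t ht
  have hlen := length_of_mem_seqsC ht
  have hbr := bridge apeach n t [] 0 hn
  simp only [List.length_nil, Nat.cast_zero, List.nil_append, sub_zero, hlen] at hbr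
  rw [hbr]
  cases h : stS apeach n 0 0 t
  · simp
  · rename_i r
    have hrlen : r.1.length = k.toNat := by rw [length_stS apeach n t 0 0 r h, hlen]
    simp only [Option.map_some]
    congr 1
    by_cases h2 : r.2 < n
    · have hsl : PySem.List.slice r.1 none (some (k-1)) = r.1.take (k-1).toNat :=
        PySem.List.slice_to _ (by omega)
      have hdl : r.1.dropLast = r.1.take (k-1).toNat := by
        rw [List.dropLast_eq_take, hrlen]
        congr 1
        omega
      simp [h2, hsl, hdl]
    · simp [h2]
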